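-- pv_equiv track=rewrite | github.com/jarvislam1999/CMSSW-12100-Homework | pp/kattis/ferryloading4.py | solve
-- ===== SOURCE A (Python) =====
-- def solve(l, cars):
--     """
--     Parameters:
--      - l: Integer. The length of the ferry.
--      - cars: List of tuples. Each tuple represents a car. The first element of the
--              tuple is the length of the car, and the second element is "left" or "right"
--              (the bank at which the car arrives). Cars appear in the list in the order
--              in which they arrive.
--
--     Returns: Integer. The number of times the ferry has to cross the river.
--     """
--
--     # Your code here.
--     left = []
--     right = []
--     for car in cars:
--         if (car[1] == 'left'):
--             left.append(car[0])
--         else: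
--             right.append(car[0])
--     bank = True
--     count = 0
--     while (len(left) != 0 or len(right) != 0):
--         cl = l * 100
--         i = 0
--         if (bank):
--             while (i < len(left) and cl >= left[i] ):
--                 cl -= left[i]
--                 i += 1
--             left = left[i:]
--         else:
--             while (i < len(right) and cl >= right[i]):
--                 cl -= right[i]
--                 i += 1
--             right = right[i:]
--         count += 1
--         bank = not bank
--
--     # Replace 0 with a suitable return value.
--     return count
-- ===== SOURCE B (Python) =====
-- def solve(l, cars):
--     # One pass: count greedy load-groups per bank, then closed-form crossing count.
--     cap = l * 100
--     gl = gr = 0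
--     rl = rr = 0
--     for c, side in cars:
--         if side == 'left':
--             if gl > 0 and rl >= c:
--                 rl -= c
--             else:
--                 gl += 1
--                 rl = cap - c
--         else:
--             if gr > 0 and rr >= c:
--                 rr -= c
--             else:
--                 gr += 1
--                 rr = cap - c
--     return max(2 * gl - 1, 2 * gr, 0)
-- ===== Notes on version B (the rewrite author's own statement) =====
-- stated objective: alternative
-- what changed: Replaced the interleaved crossing simulation with repeated list reslicing by a single pass that counts greedy load-groups per bank and a closed-form crossing count max(2*gl-1, 2*gr, 0).
-- outside the precondition, e.g. on solve(0, [(-255, 'left'), (100, 'left')]): A returns 1, B returns 1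
import Mathlib
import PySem

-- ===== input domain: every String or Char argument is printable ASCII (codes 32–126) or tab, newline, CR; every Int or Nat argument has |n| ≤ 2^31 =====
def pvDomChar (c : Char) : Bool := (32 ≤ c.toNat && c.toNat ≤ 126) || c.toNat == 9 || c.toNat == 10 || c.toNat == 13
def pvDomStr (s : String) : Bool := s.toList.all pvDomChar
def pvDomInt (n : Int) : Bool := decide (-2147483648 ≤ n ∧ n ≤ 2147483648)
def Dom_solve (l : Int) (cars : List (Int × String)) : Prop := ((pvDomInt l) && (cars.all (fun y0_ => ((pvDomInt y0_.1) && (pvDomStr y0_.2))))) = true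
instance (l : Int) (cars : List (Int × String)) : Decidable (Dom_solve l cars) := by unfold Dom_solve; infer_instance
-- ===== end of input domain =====

-- B replaces A's interleaved crossing simulation (reslicing a list per crossing) by a single pass
-- counting greedy load-groups per bank plus a closed-form crossing count (alternative algorithm).

-- ===== PORT A =====
-- inner while loop of A: loads cars from the front while capacity remains, returns the unloaded suffix (= left[i:])
def loadA (cl : Int) (xs : List Int) : List Int :=
  match xs with
  | [] => []
  | x :: rest => if cl ≥ x then loadA (cl - x) rest else x :: rest

-- A's outer while loop; fuel bounds the iterations (on Pre_ inputs it is never exhausted; outside Pre_ A diverges)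
def loopA (cap : Int) : Nat → List Int → List Int → Bool → Int → Int
  | 0, _, _, _, count => count
  | fuel+1, left, right, bank, count =>
    if left.length ≠ 0 ∨ right.length ≠ 0 then
      if bank then loopA cap fuel (loadA cap left) right (!true) (count + 1)
      else loopA cap fuel left (loadA cap right) (!false) (count + 1)
    else count

def solve (l : Int) (cars : List (Int × String)) : Int :=
  let p := cars.foldl
    (fun (p : List Int × List Int) c =>
      if c.2 == "left" then (p.1 ++ [c.1], p.2) else (p.1, p.2 ++ [c.1]))
    ([], [])
  loopA (l * 100) (2 * (p.1.length + p.2.length) + 1) p.1 p.2 true 0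

-- ===== PORT B =====
-- per-bank state (g, r): g groups opened so far, r remaining capacity of the open group
def updB (cap : Int) (s : Int × Int) (c : Int) : Int × Int :=
  if s.1 > 0 ∧ s.2 ≥ c then (s.1, s.2 - c) else (s.1 + 1, cap - c)

def solve_alt (l : Int) (cars : List (Int × String)) : Int :=
  let cap := l * 100
  let st := cars.foldl
    (fun (s : (Int × Int) × (Int × Int)) c =>
      if c.2 == "left" then (updB cap s.1 c.1, s.2) else (s.1, updB cap s.2 c.1))
    ((0, 0), (0, 0))
  max (2 * st.1.1 - 1) (max (2 * st.2.1) 0)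

-- ===== PRECONDITION & SPEC =====
-- Pre_ excludes inputs containing a car longer than the ferry capacity l*100: on such inputs A's
-- while loop normally never loads that car and loops forever; only with degenerate negative-length
-- cars (which grow the remaining capacity) can A still return there, and then B returns the same value.
def Pre_solve (l : Int) (cars : List (Int × String)) : Prop :=
  ∀ c ∈ cars, c.1 ≤ l * 100

instance (l : Int) (cars : List (Int × String)) : Decidable (Pre_solve l cars) := by
  unfold Pre_solve; infer_instance

def pvWitness_solve : Int × (List (Int × String)) := (2, [(150, "left"), (30, "right"), (100, "left")])

def Spec_solve (l : Int) (cars : List (Int × String)) (out : Int) : Prop := out = solve_alt l cars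
instance (l : Int) (cars : List (Int × String)) (out : Int) : Decidable (Spec_solve l cars out) := by unfold Spec_solve; infer_instance

-- ===== CLAIM (what is proved, stated in full; the proofs are below) =====
def Claim_equal_solve : Prop := ∀ (l : Int) (cars : List (Int × String)), Dom_solve l cars → Pre_solve l cars → Spec_solve l cars (solve l cars)

-- ===== LEMMAS AND PROOFS =====

theorem loadA_length (cl : Int) (xs : List Int) : (loadA cl xs).length ≤ xs.length := by
  induction xs generalizing cl with
  | nil => simp [loadA]
  | cons x rest ih =>
    simp only [loadA]
    split
    · exact Nat.le_succ_of_le (ih _)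
    · simp

theorem loadA_subset (cl : Int) (xs : List Int) : ∀ y ∈ loadA cl xs, y ∈ xs := by
  induction xs generalizing cl with
  | nil => simp [loadA]
  | cons x rest ih =>
    simp only [loadA]
    split
    · intro y hy; exact List.mem_cons_of_mem _ (ih _ y hy)
    · intro y hy; exact hy

-- number of greedy full-capacity groups of a bank's queue (proof-side notion)
def groupsB (cap : Int) : List Int → Nat
  | [] => 0
  | x :: rest => 1 + groupsB cap (loadA (cap - x) rest)
termination_by xs => xs.length
decreasing_by
  simp only [List.length_cons]
  exact Nat.lt_succ_of_le (loadA_length _ _)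

theorem groupsB_le_length (cap : Int) : ∀ n (xs : List Int), xs.length ≤ n → groupsB cap xs ≤ xs.length := by
  intro n
  induction n with
  | zero => intro xs h; interval_cases h' : xs.length <;> simp_all [List.length_eq_zero_iff.mp h', groupsB]
  | succ n ih =>
    intro xs h
    cases xs with
    | nil => simp [groupsB]
    | cons x rest =>
      simp only [groupsB, List.length_cons]
      have h1 := loadA_length (cap - x) rest
      have := ih (loadA (cap - x) rest) (by simpa using le_trans h1 (Nat.le_of_succ_le_succ h))
      omega

theorem groupsB_pos (cap : Int) (xs : List Int) (h : xs ≠ []) : 1 ≤ groupsB cap xs := by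
  cases xs with
  | nil => exact absurd rfl h
  | cons x rest => simp [groupsB]

-- the closed-form number of remaining crossings from a loop state
def remF (cap : Int) (left right : List Int) (bank : Bool) : Int :=
  if bank then max (2 * (groupsB cap left : Int) - 1) (max (2 * (groupsB cap right : Int)) 0)
  else max (2 * (groupsB cap left : Int)) (max (2 * (groupsB cap right : Int) - 1) 0)

theorem remF_nonneg (cap : Int) (left right : List Int) (bank : Bool) : 0 ≤ remF cap left right bank := by
  unfold remF; split <;> omega

-- one crossing from the left bank decrements the closed form
theorem remF_step_left (cap : Int) (left right : List Int)
    (hp : ∀ x ∈ left, x ≤ cap) (h : left ≠ [] ∨ right ≠ []) :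
    remF cap left right true = 1 + remF cap (loadA cap left) right false := by
  cases left with
  | nil =>
    have hr : right ≠ [] := by tauto
    have := groupsB_pos cap right hr
    have h0 : groupsB cap ([] : List Int) = 0 := by rw [groupsB]
    simp only [remF, loadA, h0, reduceIte, Bool.false_eq_true, Bool.true_eq_false, if_false]
    omega
  | cons x rest =>
    have hx : cap ≥ x := hp x (by simp)
    have hload : loadA cap (x :: rest) = loadA (cap - x) rest := by
      simp [loadA, hx]
    have hg : groupsB cap (x :: rest) = 1 + groupsB cap (loadA (cap - x) rest) := by
      rw [groupsB]
    simp only [remF, hload, hg, reduceIte, Bool.false_eq_true, Bool.true_eq_false, if_false]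
    push_cast
    omega

theorem remF_step_right (cap : Int) (left right : List Int)
    (hp : ∀ x ∈ right, x ≤ cap) (h : left ≠ [] ∨ right ≠ []) :
    remF cap left right false = 1 + remF cap left (loadA cap right) true := by
  cases right with
  | nil =>
    have hl : left ≠ [] := by tauto
    have := groupsB_pos cap left hl
    have h0 : groupsB cap ([] : List Int) = 0 := by rw [groupsB]
    simp only [remF, loadA, h0, reduceIte, Bool.false_eq_true, Bool.true_eq_false, if_false]
    omega
  | cons x rest =>
    have hx : cap ≥ x := hp x (by simp)
    have hload : loadA cap (x :: rest) = loadA (cap - x) rest := by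
      simp [loadA, hx]
    have hg : groupsB cap (x :: rest) = 1 + groupsB cap (loadA (cap - x) rest) := by
      rw [groupsB]
    simp only [remF, hload, hg, reduceIte, Bool.false_eq_true, Bool.true_eq_false, if_false]
    push_cast
    omega

-- the loop computes the closed form when given enough fuel
theorem loopA_eq (cap : Int) : ∀ (fuel : Nat) (left right : List Int) (bank : Bool) (count : Int),
    (∀ x ∈ left, x ≤ cap) → (∀ x ∈ right, x ≤ cap) →
    remF cap left right bank ≤ (fuel : Int) →
    loopA cap fuel left right bank count = count + remF cap left right bank := by
  intro fuel
  induction fuel with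
  | zero =>
    intro left right bank count _ _ hf
    have := remF_nonneg cap left right bank
    have h0 : remF cap left right bank = 0 := le_antisymm (by exact_mod_cast hf) this
    simp [loopA, h0]
  | succ n ih =>
    intro left right bank count hl hr hf
    by_cases hne : left.length ≠ 0 ∨ right.length ≠ 0
    · have hne' : left ≠ [] ∨ right ≠ [] := by
        rcases hne with h | h
        · left; exact fun e => h (by simp [e])
        · right; exact fun e => h (by simp [e])
      cases bank with
      | true =>
        have hstep := remF_step_left cap left right hl hne'
        rw [loopA, if_pos hne]
        simp only [Bool.not_true, reduceIte, Bool.false_eq_true, Bool.true_eq_false, if_false]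
        rw [ih (loadA cap left) right false (count + 1)
            (fun x hx => hl x (loadA_subset cap left x hx)) hr
            (by push_cast at hf ⊢; omega)]
        omega
      | false =>
        have hstep := remF_step_right cap left right hr hne'
        rw [loopA, if_pos hne]
        simp only [Bool.not_false, reduceIte, Bool.false_eq_true, Bool.true_eq_false, if_false]
        rw [ih left (loadA cap right) true (count + 1) hl
            (fun x hx => hr x (loadA_subset cap right x hx))
            (by push_cast at hf ⊢; omega)]
        omega
    · have h1 : left = [] := by
        rcases not_or.mp hne with ⟨h, _⟩; simpa using List.length_eq_zero_iff.mp (by omega)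
      have h2 : right = [] := by
        rcases not_or.mp hne with ⟨_, h⟩; simpa using List.length_eq_zero_iff.mp (by omega)
      subst h1; subst h2
      rw [loopA, if_neg hne]
      simp [remF, groupsB]

-- the left/right queues A builds
def leftsOf (cars : List (Int × String)) : List Int :=
  ((cars.filter (fun c => c.2 == "left")).map Prod.fst)
def rightsOf (cars : List (Int × String)) : List Int :=
  ((cars.filter (fun c => !(c.2 == "left"))).map Prod.fst)

theorem splitA_eq (cars : List (Int × String)) : ∀ (accl accr : List Int),
    cars.foldl (fun (p : List Int × List Int) c =>
      if c.2 == "left" then (p.1 ++ [c.1], p.2) else (p.1, p.2 ++ [c.1])) (accl, accr)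
      = (accl ++ leftsOf cars, accr ++ rightsOf cars) := by
  induction cars with
  | nil => simp [leftsOf, rightsOf]
  | cons c rest ih =>
    intro accl accr
    rw [List.foldl_cons]
    by_cases hc : (c.2 == "left") = true
    · rw [if_pos hc, ih]
      simp [leftsOf, rightsOf, List.filter_cons, hc]
    · rw [if_neg hc, ih]
      simp [leftsOf, rightsOf, List.filter_cons, hc]

-- B's interleaved fold splits into two independent folds
theorem foldB_split (cap : Int) (cars : List (Int × String)) :
    ∀ (sl sr : Int × Int),
    cars.foldl (fun (s : (Int × Int) × (Int × Int)) c =>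
      if c.2 == "left" then (updB cap s.1 c.1, s.2) else (s.1, updB cap s.2 c.1)) (sl, sr)
      = ((leftsOf cars).foldl (updB cap) sl, (rightsOf cars).foldl (updB cap) sr) := by
  induction cars with
  | nil => simp [leftsOf, rightsOf]
  | cons c rest ih =>
    intro sl sr
    rw [List.foldl_cons]
    by_cases hc : (c.2 == "left") = true
    · rw [if_pos hc, ih]
      simp [leftsOf, rightsOf, List.filter_cons, hc]
    · rw [if_neg hc, ih]
      simp [leftsOf, rightsOf, List.filter_cons, hc]

-- a fold with an open group counts the groups of the unloaded suffix
theorem foldUpd_open (cap : Int) : ∀ (xs : List Int) (g r : Int), 1 ≤ g →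
    (xs.foldl (updB cap) (g, r)).1 = g + (groupsB cap (loadA r xs) : Int) := by
  intro xs
  induction xs with
  | nil => intro g r _; simp [loadA, groupsB]
  | cons x rest ih =>
    intro g r hg
    simp only [List.foldl_cons, updB]
    by_cases hcond : g > 0 ∧ r ≥ x
    · rw [if_pos hcond]
      rw [ih g (r - x) hg]
      have : loadA r (x :: rest) = loadA (r - x) rest := by simp [loadA, hcond.2]
      rw [this]
    · rw [if_neg hcond]
      have hrx : ¬ (r ≥ x) := fun h => hcond ⟨by omega, h⟩
      rw [ih (g + 1) (cap - x) (by omega)]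
      have : loadA r (x :: rest) = x :: rest := by simp [loadA]; omega
      rw [this, groupsB]
      push_cast
      omega

theorem foldUpd_eq_groups (cap : Int) (xs : List Int) :
    (xs.foldl (updB cap) ((0 : Int), (0 : Int))).1 = (groupsB cap xs : Int) := by
  cases xs with
  | nil => rw [List.foldl_nil, groupsB]; simp
  | cons x rest =>
    simp only [List.foldl_cons, updB]
    rw [if_neg (by simp)]
    rw [foldUpd_open cap rest (0 + 1) (cap - x) (by omega), groupsB]
    omega

theorem pre_lefts (l : Int) (cars : List (Int × String)) (hp : Pre_solve l cars) :
    ∀ x ∈ leftsOf cars, x ≤ l * 100 := by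
  intro x hx
  simp only [leftsOf, List.mem_map] at hx
  obtain ⟨c, hc, rfl⟩ := hx
  exact hp c (List.mem_of_mem_filter hc)

theorem pre_rights (l : Int) (cars : List (Int × String)) (hp : Pre_solve l cars) :
    ∀ x ∈ rightsOf cars, x ≤ l * 100 := by
  intro x hx
  simp only [rightsOf, List.mem_map] at hx
  obtain ⟨c, hc, rfl⟩ := hx
  exact hp c (List.mem_of_mem_filter hc)

-- ===== VERDICT (by name: the statement is the Claim_ definition above) =====
theorem solve_spec : Claim_equal_solve := by
  intro l cars _ hp
  unfold Spec_solve solve solve_alt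
  set cap := l * 100 with hcap
  have hsplit := splitA_eq cars [] []
  simp only [List.nil_append] at hsplit
  have hfold := foldB_split cap cars ((0 : Int), (0 : Int)) ((0 : Int), (0 : Int))
  show loopA cap _ _ _ true 0 =
    max (2 * (cars.foldl (fun (s : (Int × Int) × (Int × Int)) c =>
        if c.2 == "left" then (updB cap s.1 c.1, s.2) else (s.1, updB cap s.2 c.1))
        ((0, 0), (0, 0))).1.1 - 1)
      (max (2 * (cars.foldl (fun (s : (Int × Int) × (Int × Int)) c =>
        if c.2 == "left" then (updB cap s.1 c.1, s.2) else (s.1, updB cap s.2 c.1))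
        ((0, 0), (0, 0))).2.1) 0)
  rw [hsplit, hfold]
  simp only []
  rw [foldUpd_eq_groups, foldUpd_eq_groups]
  have hl := pre_lefts l cars hp
  have hr := pre_rights l cars hp
  have hgl := groupsB_le_length cap (leftsOf cars).length (leftsOf cars) le_rfl
  have hgr := groupsB_le_length cap (rightsOf cars).length (rightsOf cars) le_rfl
  rw [loopA_eq cap _ _ _ true 0 hl hr (by
    simp only [remF, if_true]
    push_cast
    omega)]
  simp only [remF, if_true]
  omega
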